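-- pv_equiv track=rewrite | github.com/AlexandreDewilde/algo-training | ukiepc2017/f.py | dp
-- ===== SOURCE A (Python) =====
-- mem = {}
--
-- def dp(n, k, heads=0):
--     if (n,k,heads) in mem:
--         return mem[(n,k,heads)]
--     if k == 0:
--         return heads
--     if n == heads:
--         return dp(n,k-1, heads) + dp(n, k-1, heads-1)
--     mem[(n,k,heads)] = dp(n,k-1, heads+1) + dp(n, k-1, heads)
--     return mem[(n,k,heads)]
-- ===== SOURCE B (Python) =====
-- def dp(n, k, heads=0):
--     # bottom-up DP over layers: table[h] = value reachable from h with t steps taken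
--     table = {h: h for h in range(heads - k, heads + k + 1)}
--     for t in range(1, k + 1):
--         r = k - t
--         table = {h: (table[h] + table[h - 1]) if h == n else (table[h + 1] + table[h])
--                  for h in range(heads - r, heads + r + 1)}
--     return table[heads]
-- ===== Notes on version B (the rewrite author's own statement) =====
-- stated objective: alternative
-- what changed: Replaced A's memoized top-down recursion (global dict cache) with a bottom-up iterative DP that builds successive layers of a heads->value table over the reachable index range.
-- outside the precondition, e.g. on dp(2, -1, 0): A raises RecursionError, B raises KeyError
import Mathlib
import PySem

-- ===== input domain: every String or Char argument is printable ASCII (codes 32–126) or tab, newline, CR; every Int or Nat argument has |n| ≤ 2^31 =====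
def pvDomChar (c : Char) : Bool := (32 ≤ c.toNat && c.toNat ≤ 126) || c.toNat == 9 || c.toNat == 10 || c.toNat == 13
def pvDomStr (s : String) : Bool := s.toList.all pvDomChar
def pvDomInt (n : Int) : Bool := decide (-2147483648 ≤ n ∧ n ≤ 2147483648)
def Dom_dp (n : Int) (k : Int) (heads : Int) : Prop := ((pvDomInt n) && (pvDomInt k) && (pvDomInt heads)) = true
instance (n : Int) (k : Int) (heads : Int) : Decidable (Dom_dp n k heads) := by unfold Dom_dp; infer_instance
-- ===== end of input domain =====

-- B replaces A's memoized top-down recursion by a bottom-up layered DP over dictionaries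
-- (objective: alternative decomposition); return-value equivalence only (A also mutates a module-level memo).

-- ===== PORT A =====
-- A's recursion threads its module-level memo dict 'mem' explicitly (a hash map, as Python's
-- dict is; keys (n, k, heads)); as in A, the k == 0 and n == heads branches return without
-- storing. fuel = k (Pre_dp: 0 ≤ k; for k < 0 the Python never terminates).
def dpMemo (n : Int) (fuel : Nat) (heads : Int) (mem : Std.HashMap (Int × Int × Int) Int) :
    Int × Std.HashMap (Int × Int × Int) Int :=
  match mem[((n, (fuel : Int), heads))]? with
  | some v => (v, mem)
  | none =>
    match fuel with
    | 0 => (heads, mem)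
    | f + 1 =>
      if n = heads then
        let (a, m1) := dpMemo n f heads mem
        let (b, m2) := dpMemo n f (heads - 1) m1
        (a + b, m2)
      else
        let (a, m1) := dpMemo n f (heads + 1) mem
        let (b, m2) := dpMemo n f heads m1
        (a + b, m2.insert (n, (fuel : Int), heads) (a + b))

def dp (n : Int) (k : Int) (heads : Int) : Int := (dpMemo n k.toNat heads Std.HashMap.emptyWithCapacity).1

-- ===== PORT B =====
-- one DP layer: {h: (table[h]+table[h-1]) if h == n else (table[h+1]+table[h]) for h in range(lo, hi)}
def dpLayer (n : Int) (lo hi : Int) (table : PySem.Dict Int Int) : PySem.Dict Int Int :=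
  PySem.Dict.ofList ((PySem.List.pyRange lo hi 1).map (fun h =>
    (h, if h = n then table.getD h 0 + table.getD (h - 1) 0
        else table.getD (h + 1) 0 + table.getD h 0)))

def dp_alt (n : Int) (k : Int) (heads : Int) : Int :=
  let init := PySem.Dict.ofList ((PySem.List.pyRange (heads - k) (heads + k + 1) 1).map (fun h => (h, h)))
  let final := (PySem.List.pyRange 1 (k + 1) 1).foldl
    (fun table t => dpLayer n (heads - (k - t)) (heads + (k - t) + 1) table) init
  final.getD heads 0

-- ===== PRECONDITION & SPEC =====
-- Pre_dp excludes k < 0, where the Python A recurses forever (RecursionError) and B raises KeyError.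
def Pre_dp (_n : Int) (k : Int) (_heads : Int) : Prop := 0 ≤ k
instance (n : Int) (k : Int) (heads : Int) : Decidable (Pre_dp n k heads) := by unfold Pre_dp; infer_instance
def pvWitness_dp : Int × Int × Int := (3, 4, 1)

def Spec_dp (n : Int) (k : Int) (heads : Int) (out : Int) : Prop := out = dp_alt n k heads
instance (n : Int) (k : Int) (heads : Int) (out : Int) : Decidable (Spec_dp n k heads out) := by unfold Spec_dp; infer_instance

-- ===== CLAIM (what is proved, stated in full; the proofs are below) =====
def Claim_equal_dp : Prop := ∀ (n : Int) (k : Int) (heads : Int), Dom_dp n k heads → Pre_dp n k heads → Spec_dp n k heads (dp n k heads)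

-- ===== LEMMAS AND PROOFS =====

-- the memo-free value of A's recursion
def dpRec (n : Int) (fuel : Nat) (heads : Int) : Int :=
  match fuel with
  | 0 => heads
  | f + 1 =>
    if n = heads then dpRec n f heads + dpRec n f (heads - 1)
    else dpRec n f (heads + 1) + dpRec n f heads

-- every memo entry holds the memo-free value
def MemOK (n : Int) (mem : Std.HashMap (Int × Int × Int) Int) : Prop :=
  ∀ (f : Nat) (h v : Int), mem[((n, (f : Int), h))]? = some v → v = dpRec n f h

lemma dpMemo_ok (n : Int) (fuel : Nat) :
    ∀ (heads : Int) (mem : Std.HashMap (Int × Int × Int) Int), MemOK n mem →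
      (dpMemo n fuel heads mem).1 = dpRec n fuel heads ∧ MemOK n (dpMemo n fuel heads mem).2 := by
  induction fuel with
  | zero =>
    intro heads mem hok
    unfold dpMemo
    cases hget : mem[((n, ((0 : Nat) : Int), heads))]? with
    | some v => exact ⟨hok 0 heads v hget, hok⟩
    | none => exact ⟨rfl, hok⟩
  | succ f ih =>
    intro heads mem hok
    unfold dpMemo
    cases hget : mem[((n, ((f + 1 : Nat) : Int), heads))]? with
    | some v => exact ⟨hok (f + 1) heads v hget, hok⟩
    | none =>
      simp only
      by_cases hn : n = heads
      · simp only [if_pos hn]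
        obtain ⟨ha, hm1⟩ := ih heads mem hok
        obtain ⟨hb, hm2⟩ := ih (heads - 1) (dpMemo n f heads mem).2 hm1
        simp only [dpRec, if_pos hn]
        exact ⟨by rw [ha, hb], hm2⟩
      · simp only [if_neg hn]
        obtain ⟨ha, hm1⟩ := ih (heads + 1) mem hok
        obtain ⟨hb, hm2⟩ := ih heads (dpMemo n f (heads + 1) mem).2 hm1
        constructor
        · simp only [dpRec, if_neg hn]
          rw [ha, hb]
        · intro f' h v hv
          rw [Std.HashMap.getElem?_insert] at hv
          by_cases hkey : (n, ((f + 1 : Nat) : Int), heads) = (n, (f' : Int), h)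
          case pos =>
            rw [if_pos (by exact beq_iff_eq.mpr hkey)] at hv
            have hf : ((f + 1 : Nat) : Int) = (f' : Int) :=
              congrArg (fun p => p.2.1) hkey
            have hh : heads = h := congrArg (fun p => p.2.2) hkey
            have hf' : f' = f + 1 := by exact_mod_cast hf.symm
            subst hf' hh
            cases hv
            simp only [dpRec, if_neg hn]
            rw [ha, hb]
          case neg =>
            rw [if_neg (by simpa using hkey)] at hv
            exact hm2 f' h v hv

lemma dp_eq_dpRec (n : Int) (k : Int) (heads : Int) : dp n k heads = dpRec n k.toNat heads := by
  unfold dp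
  exact (dpMemo_ok n k.toNat heads Std.HashMap.emptyWithCapacity (by
    intro f h v hv
    simp at hv)).1


-- lookup in a dict comprehension {x: f x for x in L} with distinct keys
lemma getD_ofList_map (L : List Int) (f : Int → Int) (hL : L.Nodup) {h : Int} (hm : h ∈ L) :
    (PySem.Dict.ofList (L.map (fun x => (x, f x)))).getD h 0 = f h := by
  apply PySem.Dict.getD_of_mem_items
  · have hitems : (PySem.Dict.ofList (L.map (fun x => (x, f x)))).items
        = L.map (fun x => (x, f x)) := by
      have := PySem.Dict.items_foldl_insert_fresh (l := L.map (fun x => (x, f x)))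
        (k := Prod.fst) (v := Prod.snd) (d := (PySem.Dict.empty : PySem.Dict Int Int))
        (by intro a _; simp [PySem.Dict.contains_empty])
        (by simpa [Function.comp_def] using hL)
      simpa [PySem.Dict.ofList, PySem.Dict.update, PySem.Dict.items] using this
    rw [hitems]
    exact List.mem_map_of_mem hm
  · exact PySem.Dict.nodup_keys_ofList _

-- the layer after j iterations of B's loop
def layerD (n : Int) (k : Int) (heads : Int) (j : Nat) : PySem.Dict Int Int :=
  PySem.Dict.ofList ((PySem.List.pyRange (heads - (k - j)) (heads + (k - j) + 1) 1).map
    (fun h => (h, dpRec n j h)))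

lemma getD_layerD (n k heads : Int) (j : Nat) {h : Int}
    (hlo : heads - (k - j) ≤ h) (hhi : h < heads + (k - j) + 1) :
    (layerD n k heads j).getD h 0 = dpRec n j h := by
  unfold layerD
  exact getD_ofList_map _ _ (PySem.List.nodup_pyRange_one _ _)
    (PySem.List.mem_pyRange_one.mpr ⟨hlo, hhi⟩)

lemma dpLayer_layerD (n k heads : Int) (j : Nat) :
    dpLayer n (heads - (k - ((j : Int) + 1))) (heads + (k - ((j : Int) + 1)) + 1)
      (layerD n k heads j) = layerD n k heads (j + 1) := by
  unfold dpLayer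
  conv_rhs => unfold layerD
  congr 1
  apply List.map_congr_left
  intro h hmem
  have hb := PySem.List.mem_pyRange_one.mp hmem
  have e1 : (layerD n k heads j).getD h 0 = dpRec n j h :=
    getD_layerD n k heads j (by omega) (by omega)
  have e2 : (layerD n k heads j).getD (h - 1) 0 = dpRec n j (h - 1) :=
    getD_layerD n k heads j (by omega) (by omega)
  have e3 : (layerD n k heads j).getD (h + 1) 0 = dpRec n j (h + 1) :=
    getD_layerD n k heads j (by omega) (by omega)
  rw [e1, e2, e3]
  by_cases hh : h = n
  · simp [dpRec, hh]
  · simp [dpRec, hh, Ne.symm hh]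

lemma foldl_layers (n k heads : Int) (j : Nat) (hj : (j : Int) ≤ k) :
    (PySem.List.pyRange 1 ((j : Int) + 1) 1).foldl
      (fun table t => dpLayer n (heads - (k - t)) (heads + (k - t) + 1) table)
      (layerD n k heads 0) = layerD n k heads j := by
  induction j with
  | zero => simp [PySem.List.pyRange]
  | succ m ih =>
    have hm : (m : Int) ≤ k := by push_cast at *; omega
    have hstep : PySem.List.pyRange 1 ((m : Int) + 1 + 1) 1
        = PySem.List.pyRange 1 ((m : Int) + 1) 1 ++ [(m : Int) + 1] := by
      have := PySem.List.pyRange_one_succ_right (a := 1) (b := (m : Int) + 1) (by omega)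
      simpa using this
    rw [show ((Nat.succ m : Nat) : Int) = (m : Int) + 1 by push_cast; ring]
    rw [hstep, List.foldl_append, ih hm]
    simpa using dpLayer_layerD n k heads m

-- ===== VERDICT (by name: the statement is the Claim_ definition above) =====
theorem dp_spec : Claim_equal_dp := by
  intro n k heads _ hk
  simp only [Spec_dp, dp_alt]
  rw [dp_eq_dpRec]
  have hkc : ((k.toNat : Nat) : Int) = k := Int.toNat_of_nonneg hk
  have hinit : PySem.Dict.ofList ((PySem.List.pyRange (heads - k) (heads + k + 1) 1).map
      (fun h => (h, h))) = layerD n k heads 0 := by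
    unfold layerD
    congr 1
    push_cast
    rw [sub_zero]
    apply List.map_congr_left
    intro h _
    simp [dpRec]
  rw [hinit]
  have := foldl_layers n k heads k.toNat (by omega)
  rw [hkc] at this
  rw [this]
  rw [getD_layerD n k heads k.toNat (by omega) (by omega)]
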